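-- pv_equiv track=rewrite | github.com/userdefault13/Aseprite-Mappie | src/tilemap_generator/map_gen_cli.py | square_cells
-- ===== SOURCE A (Python) =====
-- Point = tuple[int, int]
--
-- def square_cells(center: Point, half: int, width: int, height: int) -> set[Point]:
--     cx, cy = center
--     out: set[Point] = set()
--     for y in range(cy - half, cy + half + 1):
--         for x in range(cx - half, cx + half + 1):
--             if 0 <= x < width and 0 <= y < height:
--                 out.add((x, y))
--     return out
-- ===== SOURCE B (Python) =====
-- Point = tuple[int, int]
--
-- def square_cells(center: Point, half: int, width: int, height: int) -> set[Point]: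
--     # Intersect the square with the grid in closed form, then decode a single
--     # flat range of linear indices with divmod -- no nested loops, no per-cell test.
--     cx, cy = center
--     xlo = max(0, cx - half)
--     nx = min(width, cx + half + 1) - xlo
--     ylo = max(0, cy - half)
--     ny = min(height, cy + half + 1) - ylo
--     if nx <= 0 or ny <= 0:
--         return set()
--     return {(xlo + k % nx, ylo + k // nx) for k in range(nx * ny)}
-- ===== Notes on version B (the rewrite author's own statement) =====
-- stated objective: alternative
-- what changed: Replaces A's nested loops with a per-cell bounds test by computing the square/grid intersection rectangle in closed form and generating its cells from ONE flat range of linear indices decoded with divmod (x = xlo + k % nx, y = ylo + k // nx), so there is no nested loop and no conditional per cell.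
import Mathlib
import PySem

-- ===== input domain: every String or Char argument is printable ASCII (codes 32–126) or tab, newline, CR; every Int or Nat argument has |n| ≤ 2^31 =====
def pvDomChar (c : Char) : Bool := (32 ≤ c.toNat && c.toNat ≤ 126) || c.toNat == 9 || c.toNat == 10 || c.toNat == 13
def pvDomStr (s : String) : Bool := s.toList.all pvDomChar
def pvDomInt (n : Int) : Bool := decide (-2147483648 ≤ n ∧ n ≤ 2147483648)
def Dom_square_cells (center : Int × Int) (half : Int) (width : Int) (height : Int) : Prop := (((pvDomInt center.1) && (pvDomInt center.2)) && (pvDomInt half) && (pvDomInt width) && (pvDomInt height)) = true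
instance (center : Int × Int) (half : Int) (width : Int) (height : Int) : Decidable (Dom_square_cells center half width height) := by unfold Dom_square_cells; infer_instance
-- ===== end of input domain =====

-- B computes the square/grid intersection rectangle in closed form and generates its cells
-- by divmod-decoding one flat range of linear indices: no nested loop, no per-cell test (alternative).

-- ===== PORT A =====
def square_cells (center : Int × Int) (half : Int) (width : Int) (height : Int) : List (Int × Int) :=
  let cx := center.1
  let cy := center.2
  (PySem.List.pyRange (cy - half) (cy + half + 1) 1).foldl (fun out y =>
    (PySem.List.pyRange (cx - half) (cx + half + 1) 1).foldl (fun out x =>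
      if 0 ≤ x ∧ x < width ∧ 0 ≤ y ∧ y < height then PySem.Set.add out (x, y) else out) out)
    PySem.Set.empty

-- ===== PORT B =====
def square_cells_alt (center : Int × Int) (half : Int) (width : Int) (height : Int) : List (Int × Int) :=
  let cx := center.1
  let cy := center.2
  let xlo := max 0 (cx - half)
  let nx := min width (cx + half + 1) - xlo
  let ylo := max 0 (cy - half)
  let ny := min height (cy + half + 1) - ylo
  if nx ≤ 0 ∨ ny ≤ 0 then PySem.Set.empty
  else PySem.Set.ofList ((PySem.List.pyRange 0 (nx * ny) 1).map
    (fun k => (xlo + PySem.Int.mod k nx, ylo + PySem.Int.floordiv k nx)))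

-- ===== PRECONDITION & SPEC =====
def Spec_square_cells (center : Int × Int) (half : Int) (width : Int) (height : Int) (out : List (Int × Int)) : Prop := out = square_cells_alt center half width height
instance (center : Int × Int) (half : Int) (width : Int) (height : Int) (out : List (Int × Int)) : Decidable (Spec_square_cells center half width height out) := by unfold Spec_square_cells; infer_instance

-- ===== CLAIM (what is proved, stated in full; the proofs are below) =====
def Claim_equal_square_cells : Prop := ∀ (center : Int × Int) (half : Int) (width : Int) (height : Int), Dom_square_cells center half width height → Spec_square_cells center half width height (square_cells center half width height)

-- ===== LEMMAS AND PROOFS =====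

-- a range filtered by an interval test is the clamped range
lemma filter_pyRange_interval (a b c d : Int) :
    (PySem.List.pyRange a b 1).filter (fun x => decide (c ≤ x ∧ x < d))
      = PySem.List.pyRange (max a c) (min b d) 1 := by
  apply List.Perm.eq_of_pairwise (le := (· < ·))
  · intro p q _ _ h1 h2; omega
  · exact List.Pairwise.filter _ (PySem.List.pairwise_lt_pyRange_one a b)
  · exact PySem.List.pairwise_lt_pyRange_one _ _
  · rw [List.perm_ext_iff_of_nodup
      ((PySem.List.nodup_pyRange_one a b).filter _) (PySem.List.nodup_pyRange_one _ _)]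
    intro x
    simp only [List.mem_filter, PySem.List.mem_pyRange_one, decide_eq_true_eq]
    omega

-- empty pieces of a flatMap may be dropped through a filter
lemma flatMap_eq_flatMap_filter {α β : Type} (l : List α) (p : α → Bool) (g : α → List β)
    (h : ∀ x ∈ l, p x = false → g x = []) :
    l.flatMap g = (l.filter p).flatMap g := by
  induction l with
  | nil => rfl
  | cons x t ih =>
    by_cases hx : p x = true
    · simp [hx, ih fun z hz => h z (List.mem_cons_of_mem _ hz)]
    · simp only [Bool.not_eq_true] at hx
      simp [hx, h x (List.mem_cons_self) hx,
        ih fun z hz => h z (List.mem_cons_of_mem _ hz)]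

-- the canonical form both ports reduce to: the clamped rectangle in (y asc, x asc) order
def canonCells (cx cy half width height : Int) : List (Int × Int) :=
  PySem.Set.ofList ((PySem.List.pyRange (max 0 (cy - half)) (min height (cy + half + 1)) 1).flatMap
    (fun y => (PySem.List.pyRange (max 0 (cx - half)) (min width (cx + half + 1)) 1).map
      (fun x => (x, y))))

lemma A_eq_canon (cx cy half width height : Int) :
    square_cells (cx, cy) half width height = canonCells cx cy half width height := by
  unfold square_cells canonCells
  simp only [PySem.Set.empty]
  have hinner : ∀ (y : Int) (out : List (Int × Int)),
      (PySem.List.pyRange (cx - half) (cx + half + 1) 1).foldl (fun out x =>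
        if 0 ≤ x ∧ x < width ∧ 0 ≤ y ∧ y < height then PySem.Set.add out (x, y) else out) out
      = ((if 0 ≤ y ∧ y < height then
            ((PySem.List.pyRange (cx - half) (cx + half + 1) 1).filter
              (fun x => decide (0 ≤ x ∧ x < width))).map (fun x => (x, y))
          else []).foldl PySem.Set.add out) := by
    intro y out
    rw [PySem.List.foldl_ite_eq_foldl_filter]
    by_cases hy : 0 ≤ y ∧ y < height
    · rw [if_pos hy, ← List.foldl_map]
      congr 1
      congr 1
      apply List.filter_congr
      intro x _
      simp only [decide_eq_decide]
      constructor
      · rintro ⟨h1, h2, _⟩; exact ⟨h1, h2⟩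
      · rintro ⟨h1, h2⟩; exact ⟨h1, h2, hy⟩
    · rw [if_neg hy]
      have : (PySem.List.pyRange (cx - half) (cx + half + 1) 1).filter
          (fun x => decide (0 ≤ x ∧ x < width ∧ 0 ≤ y ∧ y < height)) = [] := by
        apply List.filter_eq_nil_iff.mpr
        intro x _
        simp only [decide_eq_true_eq]
        tauto
      rw [this]; rfl
  refine Eq.trans (PySem.List.foldl_congr_mem _ _
      (fun out y => (if 0 ≤ y ∧ y < height then
          ((PySem.List.pyRange (cx - half) (cx + half + 1) 1).filter
            (fun x => decide (0 ≤ x ∧ x < width))).map (fun x => (x, y))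
        else []).foldl PySem.Set.add out) _
      (fun out y _ => hinner y out)) ?_
  rw [← List.foldl_flatMap]
  show _ = PySem.Set.ofList _
  rw [PySem.Set.ofList_eq_foldl]
  congr 1
  rw [flatMap_eq_flatMap_filter _ (fun y => decide (0 ≤ y ∧ y < height)) _
        (by intro y _ hy; rw [if_neg (by simpa using hy)])]
  refine Eq.trans (List.flatMap_congr
      (g := fun y => List.map (fun x => (x, y))
        (PySem.List.pyRange (max 0 (cx - half)) (min width (cx + half + 1)) 1))
      (fun y hy => ?_)) ?_
  · rw [List.mem_filter] at hy
    rw [if_pos (by simpa using hy.2), filter_pyRange_interval,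
      max_comm (cx - half) 0, min_comm (cx + half + 1) width]
  · rw [filter_pyRange_interval, max_comm (cy - half) 0, min_comm (cy + half + 1) height]

-- divmod-decoding a flat index range yields the rectangle row by row
lemma decode_eq_rect (nx : Int) (hx : 0 < nx) (m : Nat) (xlo ylo : Int) :
    (PySem.List.pyRange 0 (nx * m) 1).map
        (fun k => (xlo + PySem.Int.mod k nx, ylo + PySem.Int.floordiv k nx))
      = (PySem.List.pyRange ylo (ylo + m) 1).flatMap
          (fun y => (PySem.List.pyRange xlo (xlo + nx) 1).map (fun x => (x, y))) := by
  induction m with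
  | zero =>
    simp [PySem.List.pyRange_one_eq_nil]
  | succ m ih =>
    have h1 : (0 : Int) ≤ nx * m := by positivity
    have h2 : nx * (m : Int) ≤ nx * ((m : Nat) + 1 : Nat) := by push_cast; nlinarith
    rw [PySem.List.pyRange_one_append 0 (nx * m) (nx * ((m : Nat) + 1 : Nat)) h1 h2,
      List.map_append, ih]
    have hy : (ylo + ((m : Nat) + 1 : Nat) : Int) = (ylo + m) + 1 := by push_cast; ring
    rw [hy, PySem.List.pyRange_one_succ_right (by omega), List.flatMap_append]
    congr 1
    simp only [List.flatMap_cons, List.flatMap_nil, List.append_nil]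
    rw [PySem.List.pyRange_one (nx * m), PySem.List.pyRange_one xlo (xlo + nx)]
    have hlen1 : ((nx * ((m : Nat) + 1 : Nat) - nx * m).toNat) = nx.toNat := by
      push_cast
      rw [show nx * ((m : Int) + 1) - nx * (m : Int) = nx from by ring]
    have hlen2 : ((xlo + nx - xlo).toNat) = nx.toNat := by
      rw [show xlo + nx - xlo = nx from by ring]
    rw [hlen1, hlen2, List.map_map, List.map_map]
    apply List.map_congr_left
    intro k hk
    rw [List.mem_range] at hk
    have hk' : (k : Int) < nx := by omega
    have hmod : PySem.Int.mod (nx * m + k) nx = k := by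
      rw [PySem.Int.mod_eq_emod_of_pos hx, add_comm, Int.add_mul_emod_self_left,
        Int.emod_eq_of_lt (by omega) hk']
    have hdiv : PySem.Int.floordiv (nx * m + k) nx = m := by
      rw [PySem.Int.floordiv_eq_iff_of_pos hx]
      constructor <;> nlinarith
    simp only [Function.comp, hmod, hdiv]

lemma B_eq_canon (cx cy half width height : Int) :
    square_cells_alt (cx, cy) half width height = canonCells cx cy half width height := by
  unfold square_cells_alt canonCells
  dsimp only
  set xlo := max 0 (cx - half) with hxlo
  set ylo := max 0 (cy - half) with hylo
  set xhi := min width (cx + half + 1) with hxhi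
  set yhi := min height (cy + half + 1) with hyhi
  by_cases hdeg : xhi - xlo ≤ 0 ∨ yhi - ylo ≤ 0
  · rw [if_pos hdeg]
    have : (PySem.List.pyRange ylo yhi 1).flatMap
        (fun y => (PySem.List.pyRange xlo xhi 1).map (fun x => (x, y))) = [] := by
      rcases hdeg with h | h
      · rw [PySem.List.pyRange_one_eq_nil (a := xlo) (b := xhi) (by omega)]
        simp
      · rw [PySem.List.pyRange_one_eq_nil (a := ylo) (b := yhi) (by omega)]
        simp
    rw [this]
    rfl
  · rw [if_neg hdeg]
    rw [not_or] at hdeg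
    simp only [not_le] at hdeg
    obtain ⟨hx, hy⟩ := hdeg
    congr 1
    have hm : (yhi - ylo) = ((yhi - ylo).toNat : Int) := by omega
    rw [hm, decode_eq_rect (xhi - xlo) (by omega) (yhi - ylo).toNat xlo ylo]
    have e1 : ylo + ((yhi - ylo).toNat : Int) = yhi := by omega
    have e2 : xlo + (xhi - xlo) = xhi := by ring
    rw [e1, e2]

-- ===== VERDICT (by name: the statement is the Claim_ definition above) =====
theorem square_cells_spec : Claim_equal_square_cells := by
  intro center half width height _
  unfold Spec_square_cells
  obtain ⟨cx, cy⟩ := center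
  rw [A_eq_canon, B_eq_canon]
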